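-- pv_equiv track=rewrite | github.com/eleflea/facereg | recognize.py | isdirected
-- ===== SOURCE A (Python) =====
-- def isdirected(binary):
--     binary = '0' * (10 - len(binary)) + binary[2:]
--     time = 0
--     char = binary[0]
--     for c in binary[1:]:
--         if char != c:
--             char = c
--             time += 1
--     if time <= 2:
--         return True
--     else:
--         return False
-- ===== SOURCE B (Python) =====
-- def isdirected(binary):
--     binary = '0' * (10 - len(binary)) + binary[2:]
--     # at most 2 transitions <=> at most 3 maximal runs: strip the first run,
--     # then the second; what remains must be empty or a single constant run.
--     t = binary.lstrip(binary[0])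
--     if not t:
--         return True
--     u = t.lstrip(t[0])
--     return (not u) or u == u[0] * len(u)
-- ===== Notes on version B (the rewrite author's own statement) =====
-- stated objective: idiomatic
-- what changed: Replaces A's previous-char/transition-counter state machine by staged library calls: lstrip the first run, lstrip the second, then check the remainder equals the constant string u[0]*len(u) (no explicit Python loop).
import Mathlib
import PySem

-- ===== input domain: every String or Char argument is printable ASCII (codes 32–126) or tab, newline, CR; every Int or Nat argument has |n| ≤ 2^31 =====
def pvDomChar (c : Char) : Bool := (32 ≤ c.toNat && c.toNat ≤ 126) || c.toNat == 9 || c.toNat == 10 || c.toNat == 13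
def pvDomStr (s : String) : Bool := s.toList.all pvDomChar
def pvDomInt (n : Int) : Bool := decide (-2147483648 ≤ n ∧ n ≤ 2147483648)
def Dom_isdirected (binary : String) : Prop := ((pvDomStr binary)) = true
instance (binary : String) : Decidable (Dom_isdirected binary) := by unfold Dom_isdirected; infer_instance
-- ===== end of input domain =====

-- B replaces A's transition-counter state machine by staged strips of the first two runs plus a constant-string equality (idiomatic library decomposition, same cost).

-- ===== PORT A =====
def isdirected (binary : String) : Bool :=
  -- binary = '0' * (10 - len(binary)) + binary[2:]
  let l := binary.toList
  let s := PySem.List.pyRepeat ['0'] (10 - (l.length : Int)) ++ PySem.List.slice l (some 2) none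
  -- char = binary[0] — the normalized string is never empty, so the [] branch is unreachable
  match s with
  | [] => false
  | ch :: rest =>
    let st := rest.foldl (fun (st : Int × Char) c => if st.2 ≠ c then (st.1 + 1, c) else st) (0, ch)
    if st.1 ≤ 2 then true else false

-- ===== PORT B =====
def isdirected_alt (binary : String) : Bool :=
  let l := binary.toList
  let s := PySem.List.pyRepeat ['0'] (10 - (l.length : Int)) ++ PySem.List.slice l (some 2) none
  match s with
  | [] => true   -- unreachable: the normalized string is never empty
  | c0 :: _ =>
    -- t = binary.lstrip(binary[0]) — lstrip with one char drops exactly the leading run of that char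
    let t := s.dropWhile (· == c0)
    match t with
    | [] => true
    | c1 :: _ =>
      let u := t.dropWhile (· == c1)
      match u with
      | [] => true
      | c2 :: _ => decide (u = List.replicate u.length c2)   -- u == u[0] * len(u)

-- ===== PRECONDITION & SPEC =====
def Spec_isdirected (binary : String) (out : Bool) : Prop := out = isdirected_alt binary
instance (binary : String) (out : Bool) : Decidable (Spec_isdirected binary out) := by unfold Spec_isdirected; infer_instance

-- ===== CLAIM (what is proved, stated in full; the proofs are below) =====
def Claim_equal_isdirected : Prop := ∀ (binary : String), Dom_isdirected binary → Spec_isdirected binary (isdirected binary)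

-- ===== LEMMAS AND PROOFS =====

-- number of adjacent unequal pairs, seen from a previous character c (A's loop invariant)
def countA : List Char → Char → Int
  | [], _ => 0
  | x :: xs, c => if c ≠ x then 1 + countA xs x else countA xs c

theorem foldl_countA (l : List Char) (c : Char) (t : Int) :
    (l.foldl (fun (st : Int × Char) c => if st.2 ≠ c then (st.1 + 1, c) else st) (t, c)).1
      = t + countA l c := by
  induction l generalizing t c with
  | nil => simp [countA]
  | cons x xs ih =>
    rw [List.foldl_cons]
    show (List.foldl (fun (st : Int × Char) c => if st.2 ≠ c then (st.1 + 1, c) else st)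
        (if c ≠ x then (t + 1, x) else (t, c)) xs).1 = t + countA (x :: xs) c
    by_cases h : c ≠ x
    · rw [if_pos h, ih, countA, if_pos h]; ring
    · rw [if_neg h, ih, countA, if_neg h]

theorem countA_nonneg (l : List Char) (c : Char) : 0 ≤ countA l c := by
  induction l generalizing c with
  | nil => simp [countA]
  | cons x xs ih =>
    rw [countA]; split_ifs
    · have := ih x; omega
    · exact ih c

-- countA through dropping the leading run
theorem countA_dropWhile (l : List Char) (c : Char) :
    countA l c = match l.dropWhile (· == c) with
      | [] => 0
      | x :: xs => 1 + countA xs x := by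
  induction l generalizing c with
  | nil => simp [countA]
  | cons y ys ih =>
    by_cases h : y = c
    · subst h
      rw [List.dropWhile_cons]
      simp only [beq_self_eq_true, if_true]
      rw [countA, if_neg (by simp)]
      exact ih y
    · rw [List.dropWhile_cons, if_neg (by simp [h])]
      rw [countA, if_pos (fun hc => h hc.symm)]

theorem countA_zero_iff (l : List Char) (c : Char) :
    countA l c = 0 ↔ l = List.replicate l.length c := by
  induction l generalizing c with
  | nil => simp [countA]
  | cons y ys ih =>
    rw [countA]
    by_cases h : c ≠ y
    · rw [if_pos h]
      constructor
      · intro hz; have := countA_nonneg ys y; omega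
      · intro he
        simp [List.replicate] at he
        exact absurd he.1.symm h
    · rw [if_neg h]
      rw [not_ne_iff] at h
      subst h
      rw [ih]
      simp [List.replicate]

theorem AB_cons (ch : Char) (rest : List Char) :
    (if (List.foldl (fun (st : Int × Char) c => if st.2 ≠ c then (st.1 + 1, c) else st) (0, ch) rest).1 ≤ 2
     then true else false)
  = (match (ch :: rest).dropWhile (· == ch) with
     | [] => true
     | c1 :: _ =>
       match ((ch :: rest).dropWhile (· == ch)).dropWhile (· == c1) with
       | [] => true
       | c2 :: _ =>
         decide (((ch :: rest).dropWhile (· == ch)).dropWhile (· == c1)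
           = List.replicate (((ch :: rest).dropWhile (· == ch)).dropWhile (· == c1)).length c2)) := by
  rw [foldl_countA]
  have hdw : (ch :: rest).dropWhile (· == ch) = rest.dropWhile (· == ch) := by
    rw [List.dropWhile_cons]; simp
  rw [hdw]
  have h1 := countA_dropWhile rest ch
  cases ht : rest.dropWhile (· == ch) with
  | nil =>
    rw [ht] at h1
    simp only [h1]
    norm_num
  | cons c1 t1 =>
    rw [ht] at h1
    have hdw2 : (c1 :: t1).dropWhile (· == c1) = t1.dropWhile (· == c1) := by
      rw [List.dropWhile_cons]; simp
    simp only [hdw2]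
    have h2 := countA_dropWhile t1 c1
    cases hu : t1.dropWhile (· == c1) with
    | nil =>
      rw [hu] at h2
      simp only [h1, h2]
      norm_num
    | cons c2 u1 =>
      rw [hu] at h2
      have hz := countA_zero_iff u1 c2
      have hnn := countA_nonneg u1 c2
      have hiff : (0 + (1 + (1 + countA u1 c2)) ≤ 2) ↔ countA u1 c2 = 0 := by omega
      simp only [h1, h2]
      split_ifs with hc
      · symm
        rw [decide_eq_true_iff, List.length_cons, List.replicate_succ]
        exact congrArg (List.cons c2) (hz.mp (hiff.mp hc))
      · symm
        rw [decide_eq_false_iff_not]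
        intro heq
        apply hc
        apply hiff.mpr
        apply hz.mpr
        have h3 := congrArg List.tail heq
        rw [List.length_cons, List.replicate_succ] at h3
        simpa using h3

theorem norm_ne_nil (l : List Char) :
    PySem.List.pyRepeat ['0'] (10 - (l.length : Int)) ++ PySem.List.slice l (some 2) none ≠ [] := by
  intro h
  have hlen := congrArg List.length h
  rw [List.length_append, PySem.List.pyRepeat_singleton, List.length_replicate] at hlen
  have hs : PySem.List.slice l (some 2) none = l.drop 2 := by
    have := PySem.List.slice_from_natCast l 2
    simpa using this
  rw [hs, List.length_drop, List.length_nil] at hlen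
  omega

-- ===== VERDICT (by name: the statement is the Claim_ definition above) =====
theorem isdirected_spec : Claim_equal_isdirected := by
  intro binary _
  unfold Spec_isdirected isdirected isdirected_alt
  obtain ⟨ch, rest, hs⟩ := List.exists_cons_of_ne_nil (norm_ne_nil binary.toList)
  simp only [hs]
  exact AB_cons ch rest
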